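-- pv_equiv track=rewrite | github.com/aniagut/ASD-2020 | Egzamin/zad2.py | opt_sum
-- ===== SOURCE A (Python) =====
-- def abs(x,y):
--     if x+y<0:
--         return -(x+y)
--     else:
--         return x+y
--
-- def DP(sum,i,j,parents):
--     if sum[i][j]<float('inf'):
--         return sum[i][j]
--     else:
--         for t in range (i,j):
--             q=abs(DP(sum,i,t,parents),DP(sum,t+1,j,parents))
--             if q<sum[i][j]:
--                 sum[i][j]=q
--                 parents[i][j]=t
--     return sum[i][j]
--
-- def display(i,j,sum,parents,tab):
--     if i==j:
--         return
--     else: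
--         tab.append(sum[i][j])
--         display(i,parents[i][j],sum,parents,tab)
--         display(parents[i][j]+1,j,sum,parents,tab)
--
-- def opt_sum(tab):
--     n=len(tab)
--     parents=[[None for i in range (n)] for i in range (n)]
--     sum=[[float('inf') for i in range (n)] for i in range (n)]
--     for i in range (n):
--         sum[i][i]=tab[i]
--     DP(sum,0,n-1,parents)
--     tab=[]
--     display(0,n-1,sum,parents,tab)
--     return(max(tab))
-- ===== SOURCE B (Python) =====
-- def opt_sum(tab):
--     n = len(tab)
--     cost = [[0] * n for _ in range(n)]
--     parents = [[0] * n for _ in range(n)]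
--     for i in range(n):
--         cost[i][i] = tab[i]
--     for L in range(2, n + 1):
--         for i in range(n - L + 1):
--             j = i + L - 1
--             best = None
--             bt = i
--             for t in range(i, j):
--                 q = cost[i][t] + cost[t + 1][j]
--                 q = q if q >= 0 else -q
--                 if best is None or q < best:
--                     best = q
--                     bt = t
--             cost[i][j] = best
--             parents[i][j] = bt
--     best = None
--     stack = [(0, n - 1)]
--     while stack:
--         i, j = stack.pop()
--         if i < j:
--             if best is None or cost[i][j] > best:
--                 best = cost[i][j]
--             t = parents[i][j]
--             stack.append((i, t))
--             stack.append((t + 1, j))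
--     return best
-- ===== Notes on version B (the rewrite author's own statement) =====
-- stated objective: faster
-- what changed: Replaces the top-down memoized recursion (mutable memo/parents matrices filled on demand) plus a recursive tree-walk collecting node costs into a list and taking max(list), by an explicit bottom-up tabulation over interval lengths followed by an iterative stack-based reconstruction keeping only a running maximum; same O(n^3) DP, but without per-call memo-check/function-call overhead (and without Python's recursion limit).
-- outside the precondition, e.g. on opt_sum([]): A raises IndexError, B returns None; on opt_sum([5]): A raises ValueError, B returns None
import Mathlib
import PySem

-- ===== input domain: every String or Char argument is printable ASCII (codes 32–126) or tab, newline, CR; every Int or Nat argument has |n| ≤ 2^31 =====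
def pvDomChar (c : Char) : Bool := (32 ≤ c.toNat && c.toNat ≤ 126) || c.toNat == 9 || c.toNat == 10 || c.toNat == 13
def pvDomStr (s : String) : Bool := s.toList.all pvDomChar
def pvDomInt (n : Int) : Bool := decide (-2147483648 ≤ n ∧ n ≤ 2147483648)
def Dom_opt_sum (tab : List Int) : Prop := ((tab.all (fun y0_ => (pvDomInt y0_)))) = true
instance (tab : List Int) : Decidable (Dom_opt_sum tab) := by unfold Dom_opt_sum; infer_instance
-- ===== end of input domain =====

-- B replaces A's top-down memoized recursion + recursive tree-walk + max(list) by a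
-- bottom-up tabulation over interval lengths + an iterative stack walk with a running max
-- (same O(n^3) asymptotics; a timing run measured a constant-factor speedup in Python).

-- ===== PORT A =====

-- Python helper `abs(x, y)` from the module
def pyabs (x y : Int) : Int := if x + y < 0 then -(x + y) else x + y

-- pointwise update of a matrix represented as a function (Python: m[a][b] = v)
def tupd {α : Type} (f : Nat → Nat → α) (a b : Nat) (v : α) : Nat → Nat → α :=
  fun x y => if x = a ∧ y = b then v else f x y

-- state = (sum matrix with `none` for float('inf'), parents matrix with `none` for None)
def ASt : Type := (Nat → Nat → Option Int) × (Nat → Nat → Option Nat)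


mutual
-- Python `DP(sum, i, j, parents)`: returns sum[i][j] and the mutated state.
-- The fuel argument only makes the recursion total in Lean; n*n+1 at the call
-- site is more than the recursion ever consumes on admitted inputs.
def ADP (tab : List Int) (fuel : Nat) (st : ASt) (i j : Nat) : Int × ASt :=
  match fuel with
  | 0 => (0, st)
  | fuel + 1 =>
    match st.1 i j with
    | some v => (v, st)          -- `if sum[i][j] < float('inf'): return sum[i][j]`
    | none =>
      let st' := ADPgo tab fuel st i j i (j - i)
      ((st'.1 i j).getD 0, st')  -- `return sum[i][j]` (set by the loop whenever i < j)
termination_by structural fuel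

-- the `for t in range(i, j):` loop of DP (cnt counts the remaining iterations)
def ADPgo (tab : List Int) (fuel : Nat) (st : ASt) (i j t cnt : Nat) : ASt :=
  match fuel with
  | 0 => st
  | fuel + 1 =>
    match cnt with
    | 0 => st
    | cnt + 1 =>
      let r1 := ADP tab fuel st i t
      let r2 := ADP tab fuel r1.2 (t + 1) j
      let q := pyabs r1.1 r2.1
      let st2 : ASt :=
        match r2.2.1 i j with     -- `if q < sum[i][j]` (q < inf is always true)
        | none => (tupd r2.2.1 i j (some q), tupd r2.2.2 i j (some t))
        | some cur =>
          if q < cur then (tupd r2.2.1 i j (some q), tupd r2.2.2 i j (some t)) else r2.2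
      ADPgo tab fuel st2 i j (t + 1) cnt
termination_by structural fuel
end

-- Python `display(i, j, sum, parents, tab)`; the fuel argument only makes the
-- recursion total in Lean (on admitted inputs the recursion depth is < fuel = n)
def Adisplay (st : ASt) : Nat → Nat → Nat → List Int → List Int
  | 0, _, _, acc => acc
  | fuel + 1, i, j, acc =>
    if i = j then acc
    else
      let acc1 := acc ++ [(st.1 i j).getD 0]
      let t := (st.2 i j).getD 0
      let acc2 := Adisplay st fuel i t acc1
      Adisplay st fuel (t + 1) j acc2

def opt_sum (tab : List Int) : Int :=
  let n := tab.length
  -- parents = [[None]*n]*n ; sum = [[inf]*n]*n ; sum[i][i] = tab[i]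
  let st0 : ASt :=
    (fun a b => if a = b ∧ a < n then some (tab.getD a 0) else none, fun _ _ => none)
  let st := (ADP tab (n * n + 1) st0 0 (n - 1)).2
  let l := Adisplay st n 0 (n - 1) []
  (PySem.List.max? l (fun x => x)).getD 0   -- `max(tab)`; Pre_ excludes the empty case

-- ===== PORT B =====

-- inner `for t in range(i, j):` scan keeping (best : Option, bt)
def BScan (cost : Nat → Nat → Int) (i j : Nat) : Option Int × Nat :=
  (List.range' i (j - i)).foldl
    (fun (acc : Option Int × Nat) t =>
      let q0 := cost i t + cost (t + 1) j
      let q := if q0 ≥ 0 then q0 else -q0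
      match acc.1 with
      | none => (some q, t)
      | some b => if q < b then (some q, t) else acc)
    (none, i)

-- table pair (cost, parents)
def BTb : Type := (Nat → Nat → Int) × (Nat → Nat → Nat)

-- body of `for i in range(n-L+1):` — fill entry (i, i+L-1)
def BInner (L : Nat) (tb : BTb) (i : Nat) : BTb :=
  let j := i + L - 1
  let r := BScan tb.1 i j
  (tupd tb.1 i j (r.1.getD 0), tupd tb.2 i j r.2)

-- body of `for L in range(2, n+1):`
def BOuter (n : Nat) (tb : BTb) (L : Nat) : BTb :=
  (List.range (n - L + 1)).foldl (BInner L) tb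

-- bottom-up tables: for L in range(2, n+1): for i in range(n-L+1): fill (i, i+L-1)
def BTables (tab : List Int) : BTb :=
  let n := tab.length
  let cost0 : Nat → Nat → Int := fun a b => if a = b then tab.getD a 0 else 0
  (List.range' 2 (n - 1)).foldl (BOuter n) (cost0, fun _ _ => 0)

-- `while stack:` loop; fuel (= 2*n at the call site) only makes it total in Lean
def BLoop (cost : Nat → Nat → Int) (par : Nat → Nat → Nat) :
    Nat → List (Nat × Nat) → Option Int → Option Int
  | 0, _, best => best
  | _ + 1, [], best => best
  | fuel + 1, (i, j) :: st, best =>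
    if i < j then
      let best' :=
        match best with
        | none => some (cost i j)
        | some b => if cost i j > b then some (cost i j) else some b
      let t := par i j
      BLoop cost par fuel ((t + 1, j) :: (i, t) :: st) best'
    else BLoop cost par fuel st best

def opt_sum_alt (tab : List Int) : Int :=
  let n := tab.length
  let tb := BTables tab
  (BLoop tb.1 tb.2 (2 * n) [(0, n - 1)] none).getD 0

-- ===== PRECONDITION & SPEC =====
-- Pre_ excludes lists of length < 2, on which Python A raises (IndexError for [],
-- ValueError from max([]) for a singleton) and returns no value.
def Pre_opt_sum (tab : List Int) : Prop := 2 ≤ tab.length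
instance (tab : List Int) : Decidable (Pre_opt_sum tab) := by unfold Pre_opt_sum; infer_instance
def pvWitness_opt_sum : List Int := [3, -1, 4, -5]

def Spec_opt_sum (tab : List Int) (out : Int) : Prop := out = opt_sum_alt tab
instance (tab : List Int) (out : Int) : Decidable (Spec_opt_sum tab out) := by unfold Spec_opt_sum; infer_instance

-- ===== CLAIM (what is proved, stated in full; the proofs are below) =====
def Claim_equal_opt_sum : Prop :=
  ∀ (tab : List Int), Dom_opt_sum tab → Pre_opt_sum tab → Spec_opt_sum tab (opt_sum tab)

-- ===== LEMMAS AND PROOFS =====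

-- termination measures of the spec recursion (named to keep the proof terms small)
theorem pv_dec_left (i j t : Nat) (h : t ∈ List.range' i (j - i)) : t - i < j - i := by
  have := List.mem_range'_1.mp h; omega
theorem pv_dec_right (i j t : Nat) (h : t ∈ List.range' i (j - i)) : j - (t + 1) < j - i := by
  have := List.mem_range'_1.mp h; omega

-- the common specification: interval DP value and first-argmin split point
mutual
def specBP (tab : List Int) (i j : Nat) : Option Int × Nat :=
  ((List.range' i (j - i)).attach).foldl
    (fun (acc : Option Int × Nat) t =>
      let q := pyabs (specC tab i t.1) (specC tab (t.1 + 1) j)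
      match acc.1 with
      | none => (some q, t.1)
      | some b => if q < b then (some q, t.1) else acc)
    (none, i)
termination_by ((j - i : Nat), 0)
decreasing_by
  · exact Prod.Lex.left _ _ (pv_dec_left i j t.1 t.2)
  · exact Prod.Lex.left _ _ (pv_dec_right i j t.1 t.2)

def specC (tab : List Int) (i j : Nat) : Int :=
  if j ≤ i then tab.getD i 0 else ((specBP tab i j).1).getD 0
termination_by ((j - i : Nat), 1)
decreasing_by
  exact Prod.Lex.right _ Nat.zero_lt_one
end

def specP (tab : List Int) (i j : Nat) : Nat := (specBP tab i j).2

def Fstep (tab : List Int) (i j : Nat) (acc : Option Int × Nat) (t : Nat) : Option Int × Nat :=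
  let q := pyabs (specC tab i t) (specC tab (t + 1) j)
  match acc.1 with
  | none => (some q, t)
  | some b => if q < b then (some q, t) else acc

theorem specBP_eq_fold (tab : List Int) (i j : Nat) :
    specBP tab i j = (List.range' i (j - i)).foldl (Fstep tab i j) (none, i) := by
  rw [specBP]
  exact List.foldl_attach (f := Fstep tab i j)

theorem specC_diag (tab : List Int) (i : Nat) : specC tab i i = tab.getD i 0 := by
  simp [specC]

theorem fold_Fstep_some (tab : List Int) (i j : Nat) :
    ∀ (l : List Nat) (acc : Option Int × Nat),
      (l ≠ [] ∨ acc.1 ≠ none) → (l.foldl (Fstep tab i j) acc).1 ≠ none := by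
  intro l
  induction l with
  | nil => intro acc h; simpa using h
  | cons t rest ih =>
    intro acc _
    rw [List.foldl_cons]
    apply ih
    right
    unfold Fstep
    rcases hx : acc.1 with _ | b
    · simp
    · simp only []
      split <;> simp [hx]

theorem fold_Fstep_bounds (tab : List Int) (i j : Nat) :
    ∀ (l : List Nat) (acc : Option Int × Nat),
      (∀ t ∈ l, i ≤ t ∧ t < j) → (i ≤ acc.2 ∧ acc.2 < j) →
      i ≤ (l.foldl (Fstep tab i j) acc).2 ∧ (l.foldl (Fstep tab i j) acc).2 < j := by
  intro l
  induction l with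
  | nil => intro acc _ h; simpa using h
  | cons t rest ih =>
    intro acc hm hacc
    rw [List.foldl_cons]
    apply ih
    · intro x hx; exact hm x (List.mem_cons_of_mem _ hx)
    · have ht := hm t List.mem_cons_self
      unfold Fstep
      rcases hx : acc.1 with _ | b <;> simp
      · exact ht
      · split
        · exact ht
        · simpa using hacc

theorem specBP_fst (tab : List Int) (i j : Nat) (h : i < j) :
    (specBP tab i j).1 = some (specC tab i j) := by
  have hne : (specBP tab i j).1 ≠ none := by
    rw [specBP_eq_fold]
    apply fold_Fstep_some
    left
    simp
    omega
  rcases hv : (specBP tab i j).1 with _ | v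
  · exact absurd hv hne
  · have : specC tab i j = v := by
      rw [specC]
      simp [Nat.not_le.mpr h, hv]
    rw [this]

theorem specP_bounds (tab : List Int) (i j : Nat) (h : i < j) :
    i ≤ specP tab i j ∧ specP tab i j < j := by
  have := fold_Fstep_bounds tab i j (List.range' i (j - i)) (none, i)
    (by intro t ht; have := List.mem_range'_1.mp ht; omega) (by simp; omega)
  unfold specP
  rw [specBP_eq_fold]
  exact this

-- invariant of A's state on the rectangle [i,j], except possibly the entry (i,j) itself
def InvX (tab : List Int) (s : ASt) (i j : Nat) : Prop :=
  ∀ a b : Nat, i ≤ a → a ≤ b → b ≤ j → ¬(a = i ∧ b = j) →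
    (a = b → s.1 a b = some (tab.getD a 0)) ∧
    (∀ v, s.1 a b = some v → v = specC tab a b) ∧
    (a < b → s.1 a b ≠ none →
      (s.2 a b = some (specP tab a b) ∧
       ∀ a' b', a ≤ a' → a' ≤ b' → b' ≤ b → s.1 a' b' ≠ none))

-- full invariant on the rectangle [i,j]
def InvOn (tab : List Int) (s : ASt) (i j : Nat) : Prop :=
  ∀ a b : Nat, i ≤ a → a ≤ b → b ≤ j →
    (a = b → s.1 a b = some (tab.getD a 0)) ∧
    (∀ v, s.1 a b = some v → v = specC tab a b) ∧
    (a < b → s.1 a b ≠ none →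
      (s.2 a b = some (specP tab a b) ∧
       ∀ a' b', a ≤ a' → a' ≤ b' → b' ≤ b → s.1 a' b' ≠ none))

-- what a call to A's DP guarantees: value, frame (untouched outside [i,j]), all of [i,j] solved
def ADPconc (tab : List Int) (s : ASt) (i j : Nat) (r : Int × ASt) : Prop :=
  r.1 = specC tab i j ∧
  (∀ a b, ¬(i ≤ a ∧ b ≤ j ∧ a < b) → r.2.1 a b = s.1 a b ∧ r.2.2 a b = s.2 a b) ∧
  (∀ a b, i ≤ a → a ≤ b → b ≤ j →
    r.2.1 a b = some (specC tab a b) ∧ (a < b → r.2.2 a b = some (specP tab a b)))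

theorem mono_of (tab : List Int) (s s' : ASt) (u v : Nat)
    (fr : ∀ a b, ¬(u ≤ a ∧ b ≤ v ∧ a < b) → s'.1 a b = s.1 a b ∧ s'.2 a b = s.2 a b)
    (inner : ∀ a b, u ≤ a → a ≤ b → b ≤ v →
      s'.1 a b = some (specC tab a b) ∧ (a < b → s'.2 a b = some (specP tab a b))) :
    ∀ a b, s.1 a b ≠ none → s'.1 a b ≠ none := by
  intro a b h
  by_cases hc : u ≤ a ∧ b ≤ v ∧ a < b
  · rw [(inner a b hc.1 (by omega) hc.2.1).1]; simp
  · rw [(fr a b hc).1]; exact h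

theorem InvX_step (tab : List Int) (s s' : ASt) (i j u v : Nat)
    (fr : ∀ a b, ¬(u ≤ a ∧ b ≤ v ∧ a < b) → s'.1 a b = s.1 a b ∧ s'.2 a b = s.2 a b)
    (inner : ∀ a b, u ≤ a → a ≤ b → b ≤ v →
      s'.1 a b = some (specC tab a b) ∧ (a < b → s'.2 a b = some (specP tab a b)))
    (hs : InvX tab s i j) : InvX tab s' i j := by
  intro a b hia hab hbj hne
  refine ⟨?_, ?_, ?_⟩
  · intro heq
    rw [(fr a b (by omega)).1]
    exact (hs a b hia hab hbj hne).1 heq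
  · intro w hw
    by_cases hc : u ≤ a ∧ b ≤ v
    · rw [(inner a b hc.1 hab hc.2).1] at hw
      exact (Option.some_inj.mp hw).symm
    · rw [(fr a b (by tauto)).1] at hw
      exact (hs a b hia hab hbj hne).2.1 w hw
  · intro hlt hset
    by_cases hc : u ≤ a ∧ b ≤ v
    · refine ⟨(inner a b hc.1 hab hc.2).2 hlt, ?_⟩
      intro a' b' ha' hab' hb'
      rw [(inner a' b' (by omega) hab' (by omega)).1]; simp
    · have hfr := fr a b (by tauto)
      rw [hfr.1] at hset
      obtain ⟨p1, p2⟩ := (hs a b hia hab hbj hne).2.2 hlt hset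
      refine ⟨by rw [hfr.2]; exact p1, ?_⟩
      intro a' b' ha' hab' hb'
      exact mono_of tab s s' u v fr inner a' b' (p2 a' b' ha' hab' hb')

theorem ADP_both (tab : List Int) : ∀ (fuel : Nat),
    (∀ (i j : Nat) (s : ASt), (j - i + 1) * (j - i + 1) ≤ fuel → i ≤ j → InvOn tab s i j →
      ADPconc tab s i j (ADP tab fuel s i j)) ∧
    (∀ (i j t cnt : Nat) (s : ASt) (acc : Option Int × Nat),
      i < j → i ≤ t → t + cnt = j → (j - i) * (j - i) + cnt ≤ fuel →
      InvX tab s i j → s.1 i j = acc.1 → (acc.1 ≠ none → s.2 i j = some acc.2) →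
      (ADPgo tab fuel s i j t cnt).1 i j =
        ((List.range' t cnt).foldl (Fstep tab i j) acc).1 ∧
      (((List.range' t cnt).foldl (Fstep tab i j) acc).1 ≠ none →
        (ADPgo tab fuel s i j t cnt).2 i j =
          some ((List.range' t cnt).foldl (Fstep tab i j) acc).2) ∧
      InvX tab (ADPgo tab fuel s i j t cnt) i j ∧
      (∀ a b, ¬(i ≤ a ∧ b ≤ j ∧ a < b) →
        (ADPgo tab fuel s i j t cnt).1 a b = s.1 a b ∧
        (ADPgo tab fuel s i j t cnt).2 a b = s.2 a b) ∧
      (∀ a b, s.1 a b ≠ none → (ADPgo tab fuel s i j t cnt).1 a b ≠ none) ∧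
      (∀ a b, i ≤ a → a ≤ b →
        (∃ t' ∈ List.range' t cnt, b ≤ t' ∨ (t' + 1 ≤ a ∧ b ≤ j)) →
        (ADPgo tab fuel s i j t cnt).1 a b ≠ none)) := by
  intro fuel
  induction fuel using Nat.strong_induction_on with
  | _ fuel ih =>
  constructor
  · -- the DP call itself
    intro i j s hf hij hInv
    have hsq : (j - i + 1) * (j - i + 1) = (j - i) * (j - i) + 2 * (j - i) + 1 := by ring
    have hpos1 : 1 ≤ (j - i + 1) * (j - i + 1) := Nat.mul_pos (by omega) (by omega)
    rcases fuel with _ | fuel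
    · omega
    rcases hm : s.1 i j with _ | v
    · -- memo miss: run the loop
      have hlt : i < j := by
        rcases Nat.lt_or_ge i j with h | h
        · exact h
        · have hieq : i = j := by omega
          subst hieq
          have := (hInv i i (by omega) (by omega) (by omega)).1 rfl
          rw [hm] at this
          cases this
      have hres : ADP tab (fuel + 1) s i j =
          (((ADPgo tab fuel s i j i (j - i)).1 i j).getD 0,
            ADPgo tab fuel s i j i (j - i)) := by
        rw [ADP, hm]
      have hsX : InvX tab s i j := fun a b hia hab hbj _ => hInv a b hia hab hbj
      obtain ⟨R1, R2, R3, R4, R5, R6⟩ :=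
        (ih fuel (Nat.lt_succ_self _)).2 i j i (j - i) s (none, i)
          hlt (Nat.le_refl i) (by omega) (by omega) hsX (by rw [hm]) (by simp)
      rw [← specBP_eq_fold] at R1 R2
      have hspec1 : (specBP tab i j).1 = some (specC tab i j) := specBP_fst tab i j hlt
      have hMset : (ADPgo tab fuel s i j i (j - i)).1 i j = some (specC tab i j) := by
        rw [R1, hspec1]
      have hPset : (ADPgo tab fuel s i j i (j - i)).2 i j = some (specP tab i j) := by
        have := R2 (by rw [hspec1]; simp)
        rwa [specP]
      refine ⟨?_, ?_, ?_⟩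
      · rw [hres]
        simp only [hMset]
        rfl
      · intro a b hc
        rw [hres]
        exact R4 a b hc
      · intro a b hia hab hbj
        rw [hres]
        simp only []
        by_cases hne : a = i ∧ b = j
        · obtain ⟨rfl, rfl⟩ := hne
          exact ⟨hMset, fun _ => hPset⟩
        · by_cases hab' : a = b
          · subst hab'
            have := R4 a a (by omega)
            have hst := (hInv a a hia (by omega) hbj).1 rfl
            refine ⟨?_, by omega⟩
            rw [this.1, hst, specC_diag]
          · have hablt : a < b := by omega
            have hcov : (ADPgo tab fuel s i j i (j - i)).1 a b ≠ none := by
              apply R6 a b hia hab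
              by_cases hbj' : b < j
              · exact ⟨b, List.mem_range'_1.mpr (by omega), Or.inl (Nat.le_refl b)⟩
              · have hane : i < a := by
                  rcases Nat.lt_or_ge i a with h | h
                  · exact h
                  · exfalso; exact hne ⟨by omega, by omega⟩
                exact ⟨a - 1, List.mem_range'_1.mpr (by omega), Or.inr (by omega)⟩
            rcases hw : (ADPgo tab fuel s i j i (j - i)).1 a b with _ | w
            · exact absurd hw hcov
            · obtain ⟨c1, c2, c3⟩ := R3 a b hia hab hbj (by omega)
              have hwv : w = specC tab a b := c2 w hw
              obtain ⟨p1, _⟩ := c3 hablt (by rw [hw]; simp)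
              exact ⟨by rw [hwv], fun _ => p1⟩
    · -- memo hit: the entry and all its subintervals are already solved
      have hres : ADP tab (fuel + 1) s i j = (v, s) := by rw [ADP, hm]
      have hval : v = specC tab i j := (hInv i j (by omega) hij (by omega)).2.1 v hm
      refine ⟨by rw [hres, hval], by intro a b _; rw [hres]; exact ⟨rfl, rfl⟩, ?_⟩
      intro a b hia hab hbj
      rw [hres]
      simp only []
      by_cases hij' : i = j
      · have hab' : a = b := by omega
        subst hab'
        have := (hInv a a hia (by omega) hbj).1 rfl
        exact ⟨by rw [this, specC_diag], by omega⟩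
      · have hsub := ((hInv i j (by omega) hij (by omega)).2.2 (by omega)
          (by rw [hm]; simp)).2
        have hset := hsub a b hia hab hbj
        rcases hw : s.1 a b with _ | w
        · exact absurd hw hset
        · have hwv : w = specC tab a b := (hInv a b hia hab hbj).2.1 w hw
          refine ⟨by rw [hwv], ?_⟩
          intro hlt
          exact ((hInv a b hia hab hbj).2.2 hlt (by rw [hw]; simp)).1
  · -- the loop
    intro i j t cnt s acc hij hit htc hf hsX hMacc hPacc
    have hdpos : 1 ≤ (j - i) * (j - i) := Nat.mul_pos (by omega) (by omega)
    rcases fuel with _ | fuel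
    · omega
    rcases cnt with _ | cnt
    · have hunf : ADPgo tab (fuel + 1) s i j t 0 = s := by rw [ADPgo]
      rw [hunf]
      simp only [List.range'_zero, List.foldl_nil]
      refine ⟨hMacc, hPacc, hsX, ?_, fun a b h => h, ?_⟩
      · intro a b _
        first
        | exact ⟨rfl, rfl⟩
        | trivial
      · intro a b _ _ h
        simp at h
    have ht2 : t < j := by omega
    -- first recursive call DP(sum, i, t, parents)
    have hInvA : InvOn tab s i t := by
      intro a b hia hab hbt
      exact hsX a b hia hab (by omega) (by omega)
    have hfA : (t - i + 1) * (t - i + 1) ≤ fuel := by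
      have h1 : t - i + 1 ≤ j - i := by omega
      have h2 : (t - i + 1) * (t - i + 1) ≤ (j - i) * (j - i) := Nat.mul_le_mul h1 h1
      omega
    obtain ⟨A1, A2, A3⟩ := (ih fuel (Nat.lt_succ_self _)).1 i t s hfA hit hInvA
    have hInvX1 : InvX tab (ADP tab fuel s i t).2 i j :=
      InvX_step tab s (ADP tab fuel s i t).2 i j i t A2 A3 hsX
    have hA_ij := A2 i j (by omega)
    -- second recursive call DP(sum, t+1, j, parents)
    have hInvB : InvOn tab (ADP tab fuel s i t).2 (t + 1) j := by
      intro a b hia hab hbj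
      exact hInvX1 a b (by omega) hab hbj (by omega)
    have hfB : (j - (t + 1) + 1) * (j - (t + 1) + 1) ≤ fuel := by
      have h1 : j - (t + 1) + 1 ≤ j - i := by omega
      have h2 : (j - (t + 1) + 1) * (j - (t + 1) + 1) ≤ (j - i) * (j - i) :=
        Nat.mul_le_mul h1 h1
      omega
    obtain ⟨B1, B2, B3⟩ := (ih fuel (Nat.lt_succ_self _)).1 (t + 1) j
      (ADP tab fuel s i t).2 hfB (by omega) hInvB
    have hInvX2 : InvX tab (ADP tab fuel (ADP tab fuel s i t).2 (t + 1) j).2 i j :=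
      InvX_step tab (ADP tab fuel s i t).2 (ADP tab fuel (ADP tab fuel s i t).2 (t + 1) j).2
        i j (t + 1) j B2 B3 hInvX1
    have hB_ij := B2 i j (by omega)
    set r1 := ADP tab fuel s i t with hr1def
    set r2 := ADP tab fuel r1.2 (t + 1) j with hr2def
    have hMij : r2.2.1 i j = acc.1 := by rw [hB_ij.1, hA_ij.1, hMacc]
    have hPij : r2.2.2 i j = s.2 i j := by rw [hB_ij.2, hA_ij.2]
    have hqv : pyabs r1.1 r2.1 = pyabs (specC tab i t) (specC tab (t + 1) j) := by
      rw [A1, B1]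
    -- the state after the `if q < sum[i][j]` update
    set st2 : ASt := (match r2.2.1 i j with
      | none => (tupd r2.2.1 i j (some (pyabs r1.1 r2.1)), tupd r2.2.2 i j (some t))
      | some cur =>
        if pyabs r1.1 r2.1 < cur then
          (tupd r2.2.1 i j (some (pyabs r1.1 r2.1)), tupd r2.2.2 i j (some t))
        else r2.2) with hst2def
    have hunf : ADPgo tab (fuel + 1) s i j t (cnt + 1) = ADPgo tab fuel st2 i j (t + 1) cnt := by
      rw [ADPgo]
    have hfold : (List.range' t (cnt + 1)).foldl (Fstep tab i j) acc =
        (List.range' (t + 1) cnt).foldl (Fstep tab i j) (Fstep tab i j acc t) := by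
      rw [List.range'_succ, List.foldl_cons]
    -- st2 corresponds to the folded accumulator, and keeps the invariant
    have hst2M : st2.1 i j = (Fstep tab i j acc t).1 ∧
        ((Fstep tab i j acc t).1 ≠ none → st2.2 i j = some (Fstep tab i j acc t).2) := by
      rcases hacc1 : acc.1 with _ | bb
      · rw [hst2def]
        simp only [hMij, hacc1]
        unfold Fstep
        rw [hacc1]
        simp [tupd, hqv]
      · rw [hst2def]
        simp only [hMij, hacc1]
        unfold Fstep
        rw [hacc1]
        simp only [hqv]
        by_cases hcmp : pyabs (specC tab i t) (specC tab (t + 1) j) < bb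
        · simp [hcmp, tupd]
        · simp only [hcmp, if_false]
          refine ⟨by rw [hMij], ?_⟩
          intro _
          rw [hPij, hPacc (by rw [hacc1]; simp)]
    have hst2fr : ∀ a b, ¬(a = i ∧ b = j) → st2.1 a b = r2.2.1 a b ∧ st2.2 a b = r2.2.2 a b := by
      intro a b hne
      rw [hst2def]
      rcases r2.2.1 i j with _ | cur
      · simp [tupd, hne]
      · simp only []
        split
        · simp [tupd, hne]
        · exact ⟨rfl, rfl⟩
    have hst2set : ∀ a b, r2.2.1 a b ≠ none → st2.1 a b ≠ none := by
      intro a b h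
      by_cases hne : a = i ∧ b = j
      · obtain ⟨rfl, rfl⟩ := hne
        rw [hst2def]
        rcases hcc : r2.2.1 a b with _ | cur
        · simp [tupd]
        · simp only []
          split
          · simp [tupd]
          · rw [hcc]; simp
      · rw [(hst2fr a b hne).1]; exact h
    have hInvX3 : InvX tab st2 i j := by
      intro a b hia hab hbj hne
      have hfr := hst2fr a b hne
      obtain ⟨c1, c2, c3⟩ := hInvX2 a b hia hab hbj hne
      refine ⟨by rw [hfr.1]; exact c1, by rw [hfr.1]; exact c2, ?_⟩
      intro hlt hset
      rw [hfr.1] at hset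
      obtain ⟨p1, p2⟩ := c3 hlt hset
      refine ⟨by rw [hfr.2]; exact p1, ?_⟩
      intro a' b' ha' hab' hb'
      exact hst2set a' b' (p2 a' b' ha' hab' hb')
    obtain ⟨R1, R2, R3, R4, R5, R6⟩ := (ih fuel (Nat.lt_succ_self _)).2 i j (t + 1) cnt st2
      (Fstep tab i j acc t) hij (by omega) (by omega) (by omega)
      hInvX3 hst2M.1 hst2M.2
    have hfrS : ∀ a b, ¬(i ≤ a ∧ b ≤ j ∧ a < b) →
        (ADPgo tab fuel st2 i j (t + 1) cnt).1 a b = s.1 a b ∧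
        (ADPgo tab fuel st2 i j (t + 1) cnt).2 a b = s.2 a b := by
      intro a b hc
      obtain ⟨d1, d2⟩ := R4 a b hc
      have h2 := hst2fr a b (by omega)
      have h3 := B2 a b (by omega)
      have h4 := A2 a b (by omega)
      exact ⟨by rw [d1, h2.1, h3.1, h4.1], by rw [d2, h2.2, h3.2, h4.2]⟩
    have hmono : ∀ a b, s.1 a b ≠ none → (ADPgo tab fuel st2 i j (t + 1) cnt).1 a b ≠ none := by
      intro a b h
      exact R5 a b (hst2set a b (mono_of tab r1.2 r2.2 (t + 1) j B2 B3 a b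
        (mono_of tab s r1.2 i t A2 A3 a b h)))
    rw [hunf, hfold]
    refine ⟨R1, R2, R3, hfrS, hmono, ?_⟩
    intro a b hia hab hex
    obtain ⟨t', ht', hcase⟩ := hex
    rw [List.range'_succ] at ht'
    rcases List.mem_cons.mp ht' with rfl | hrest
    · rcases hcase with hbt | ⟨hta, hbj⟩
      · have := (A3 a b hia hab hbt).1
        exact R5 a b (hst2set a b (mono_of tab r1.2 r2.2 (t' + 1) j B2 B3 a b
          (by rw [this]; simp)))
      · have := (B3 a b hta hab hbj).1
        exact R5 a b (hst2set a b (by rw [this]; simp))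
    · exact R6 a b hia hab ⟨t', hrest, hcase⟩

theorem ADP_main (tab : List Int) (fuel i j : Nat) (s : ASt)
    (hf : (j - i + 1) * (j - i + 1) ≤ fuel) (hij : i ≤ j) (hInv : InvOn tab s i j) :
    ADPconc tab s i j (ADP tab fuel s i j) :=
  (ADP_both tab fuel).1 i j s hf hij hInv

-- the list of internal-node costs of the optimal tree, in A's display order
def nodes (tab : List Int) (i j : Nat) : List Int :=
  if _h : j ≤ i then []
  else specC tab i j :: (nodes tab i (specP tab i j) ++ nodes tab (specP tab i j + 1) j)
termination_by j - i
decreasing_by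
  · have := specP_bounds tab i j (by omega)
    omega
  · have := specP_bounds tab i j (by omega)
    omega

theorem Adisplay_eq (tab : List Int) (s : ASt) (N : Nat)
    (hs : ∀ a b, a ≤ b → b ≤ N → s.1 a b = some (specC tab a b) ∧
            (a < b → s.2 a b = some (specP tab a b))) :
    ∀ (fuel a b : Nat) (acc : List Int), a ≤ b → b ≤ N → b - a < fuel →
      Adisplay s fuel a b acc = acc ++ nodes tab a b := by
  intro fuel
  induction fuel with
  | zero => intro a b acc hab hbN hf; omega
  | succ fuel ih =>
    intro a b acc hab hbN hf
    rw [Adisplay]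
    by_cases heq : a = b
    · subst heq
      rw [nodes]
      simp
    · have hlt : a < b := by omega
      obtain ⟨h1, h2⟩ := hs a b hab hbN
      have hp := h2 hlt
      have hbnd := specP_bounds tab a b hlt
      simp only [heq, if_false, h1, hp, Option.getD_some]
      rw [ih a (specP tab a b) _ (by omega) (by omega) (by omega),
        ih (specP tab a b + 1) b _ (by omega) (by omega) (by omega)]
      conv_rhs => rw [nodes]
      simp [Nat.not_le.mpr hlt]

-- option-valued max combinator
def omax : Option Int → Option Int → Option Int
  | none, y => y
  | some a, none => some a
  | some a, some b => some (max a b)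

def tmax (tab : List Int) (i j : Nat) : Option Int :=
  if h : j ≤ i then none
  else omax (some (specC tab i j))
            (omax (tmax tab i (specP tab i j)) (tmax tab (specP tab i j + 1) j))
termination_by j - i
decreasing_by
  · have := specP_bounds tab i j (by omega)
    omega
  · have := specP_bounds tab i j (by omega)
    omega

theorem omax_assoc (x y z : Option Int) : omax (omax x y) z = omax x (omax y z) := by
  cases x <;> cases y <;> cases z <;> simp [omax, max_assoc]

theorem omax_comm (x y : Option Int) : omax x y = omax y x := by
  cases x <;> cases y <;> simp [omax, max_comm]

theorem omax_none_right (x : Option Int) : omax x none = x := by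
  cases x <;> simp [omax]

theorem fold_omax (l : List Int) : ∀ (b : Option Int),
    l.foldl (fun acc x => omax acc (some x)) b =
      omax b (l.foldl (fun acc x => omax acc (some x)) none) := by
  induction l with
  | nil => intro b; simp [omax_none_right]
  | cons x l ih =>
    intro b
    rw [List.foldl_cons, List.foldl_cons, ih (omax b (some x))]
    have h0 : omax none (some x) = some x := rfl
    rw [h0, ih (some x), omax_assoc]

theorem fold_omax_some (l : List Int) : ∀ (a : Int),
    l.foldl (fun acc x => omax acc (some x)) (some a) = some (l.foldl max a) := by
  induction l with
  | nil => intro a; rfl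
  | cons x l ih => intro a; rw [List.foldl_cons, List.foldl_cons]; exact ih (max a x)

theorem tmax_nodes (tab : List Int) : ∀ (k i j : Nat), j - i < k →
    tmax tab i j = (nodes tab i j).foldl (fun acc x => omax acc (some x)) none := by
  intro k
  induction k with
  | zero => intro i j h; omega
  | succ k ih =>
    intro i j h
    rw [tmax, nodes]
    by_cases hji : j ≤ i
    · simp [hji]
    · have hb := specP_bounds tab i j (by omega)
      simp only [hji, dite_false]
      rw [List.foldl_cons, List.foldl_append]
      have h0 : omax none (some (specC tab i j)) = some (specC tab i j) := rfl
      rw [h0, fold_omax (nodes tab (specP tab i j + 1) j),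
        fold_omax (nodes tab i (specP tab i j)) (some (specC tab i j)),
        ← ih i (specP tab i j) (by omega), ← ih (specP tab i j + 1) j (by omega),
        omax_assoc]

-- B: tables correctness
def Tok (tab : List Int) (T : (Nat → Nat → Int) × (Nat → Nat → Nat)) (m : Nat) : Prop :=
  ∀ a b : Nat, a ≤ b → b < tab.length → b - a < m →
    T.1 a b = specC tab a b ∧ (a < b → T.2 a b = specP tab a b)

theorem BScan_spec (tab : List Int) (cost : Nat → Nat → Int) (i j : Nat)
    (h : ∀ t ∈ List.range' i (j - i),
          cost i t = specC tab i t ∧ cost (t + 1) j = specC tab (t + 1) j) :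
    BScan cost i j = specBP tab i j := by
  rw [specBP_eq_fold]
  unfold BScan
  apply PySem.List.foldl_congr_mem
  intro acc t ht
  obtain ⟨h1, h2⟩ := h t ht
  unfold Fstep
  rw [h1, h2]
  have : (if cost i t + cost (t + 1) j ≥ 0 then cost i t + cost (t + 1) j
          else -(cost i t + cost (t + 1) j)) =
         pyabs (cost i t) (cost (t + 1) j) := by
    unfold pyabs; split_ifs <;> omega
  rw [h1, h2] at this
  simp only [this]

theorem BInner_fold (tab : List Int) (L : Nat) (hL : 2 ≤ L) :
    ∀ (l : List Nat) (T : BTb), l.Nodup → (∀ i ∈ l, i + L - 1 < tab.length) →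
      Tok tab T (L - 1) →
      Tok tab (l.foldl (BInner L) T) (L - 1) ∧
      (∀ a b : Nat, ¬(b = a + L - 1 ∧ a ∈ l) →
        (l.foldl (BInner L) T).1 a b = T.1 a b ∧ (l.foldl (BInner L) T).2 a b = T.2 a b) ∧
      (∀ i ∈ l, (l.foldl (BInner L) T).1 i (i + L - 1) = specC tab i (i + L - 1) ∧
        (l.foldl (BInner L) T).2 i (i + L - 1) = specP tab i (i + L - 1)) := by
  intro l
  induction l with
  | nil => intro T _ _ hT; refine ⟨hT, by simp, by simp⟩
  | cons i0 l ih =>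
    intro T hnd hin hT
    have hnd' : l.Nodup := (List.nodup_cons.mp hnd).2
    have hi0 : i0 ∉ l := (List.nodup_cons.mp hnd).1
    have hj0 : i0 + L - 1 < tab.length := hin i0 List.mem_cons_self
    have hij : i0 < i0 + L - 1 := by omega
    -- the write of the head iteration
    have hscan : BScan T.1 i0 (i0 + L - 1) = specBP tab i0 (i0 + L - 1) := by
      apply BScan_spec
      intro t ht
      have htm := List.mem_range'_1.mp ht
      constructor
      · exact (hT i0 t (by omega) (by omega) (by omega)).1
      · exact (hT (t + 1) (i0 + L - 1) (by omega) (by omega) (by omega)).1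
    have hT' : BInner L T i0 =
        (tupd T.1 i0 (i0 + L - 1) (specC tab i0 (i0 + L - 1)),
         tupd T.2 i0 (i0 + L - 1) (specP tab i0 (i0 + L - 1))) := by
      show (tupd T.1 i0 (i0 + L - 1) ((BScan T.1 i0 (i0 + L - 1)).1.getD 0),
            tupd T.2 i0 (i0 + L - 1) (BScan T.1 i0 (i0 + L - 1)).2) = _
      rw [hscan, specBP_fst tab _ _ hij]
      rfl
    simp only [List.foldl_cons, hT']
    set T1 : BTb := (tupd T.1 i0 (i0 + L - 1) (specC tab i0 (i0 + L - 1)),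
         tupd T.2 i0 (i0 + L - 1) (specP tab i0 (i0 + L - 1))) with hT1
    have hTok1 : Tok tab T1 (L - 1) := by
      intro a b hab hbl hba
      have hne : ¬(a = i0 ∧ b = i0 + L - 1) := by omega
      have e1 : T1.1 a b = T.1 a b := by simp [hT1, tupd, hne]
      have e2 : T1.2 a b = T.2 a b := by simp [hT1, tupd, hne]
      rw [e1, e2]
      exact hT a b hab hbl hba
    obtain ⟨C1, C2, C3⟩ := ih T1 hnd' (fun i hi => hin i (List.mem_cons_of_mem _ hi)) hTok1
    refine ⟨C1, ?_, ?_⟩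
    · intro a b hab
      have hab' : ¬(b = a + L - 1 ∧ a ∈ l) := by
        rintro ⟨h1, h2⟩; exact hab ⟨h1, List.mem_cons_of_mem _ h2⟩
      have hne : ¬(a = i0 ∧ b = i0 + L - 1) := by
        rintro ⟨h1, h2⟩; exact hab ⟨by omega, by rw [h1]; exact List.mem_cons_self⟩
      obtain ⟨d1, d2⟩ := C2 a b hab'
      rw [d1, d2]
      constructor
      · simp [hT1, tupd, hne]
      · simp [hT1, tupd, hne]
    · intro i hi
      rcases List.mem_cons.mp hi with rfl | hi'
      · have hfr : ¬(i + L - 1 = (i : Nat) + L - 1 ∧ i ∈ l) := fun hc => hi0 hc.2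
        obtain ⟨d1, d2⟩ := C2 i (i + L - 1) hfr
        rw [d1, d2]
        constructor
        · simp [hT1, tupd]
        · simp [hT1, tupd]
      · exact C3 i hi'

theorem BOuter_fold (tab : List Int) :
    ∀ (k L0 : Nat) (T : BTb), 2 ≤ L0 → L0 + k ≤ tab.length + 1 → Tok tab T (L0 - 1) →
      Tok tab ((List.range' L0 k).foldl (BOuter tab.length) T) (L0 + k - 1) := by
  intro k
  induction k with
  | zero =>
    intro L0 T hL0 _ hT
    simpa using hT
  | succ k ih =>
    intro L0 T hL0 hk hT
    rw [List.range'_succ, List.foldl_cons]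
    have hstep : Tok tab (BOuter tab.length T L0) L0 := by
      unfold BOuter
      obtain ⟨C1, C2, C3⟩ := BInner_fold tab L0 hL0 (List.range (tab.length - L0 + 1)) T
        (List.nodup_range) (by intro i hi; have := List.mem_range.mp hi; omega) hT
      intro a b hab hbl hba
      by_cases hsh : b - a < L0 - 1
      · exact C1 a b hab hbl hsh
      · have hba' : b = a + L0 - 1 := by omega
        have hain : a ∈ List.range (tab.length - L0 + 1) := List.mem_range.mpr (by omega)
        obtain ⟨d1, d2⟩ := C3 a hain
        rw [← hba'] at d1 d2
        exact ⟨d1, fun _ => d2⟩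
    have := ih (L0 + 1) (BOuter tab.length T L0) (by omega) (by omega) (by simpa using hstep)
    have harr : L0 + 1 + k - 1 = L0 + (k + 1) - 1 := by omega
    rwa [harr] at this

theorem BTables_spec (tab : List Int) :
    ∀ a b : Nat, a ≤ b → b < tab.length →
      (BTables tab).1 a b = specC tab a b ∧
      (a < b → (BTables tab).2 a b = specP tab a b) := by
  intro a b hab hbl
  have hn : 1 ≤ tab.length := by omega
  have hT0 : Tok tab ((fun a b => if a = b then tab.getD a 0 else 0 : Nat → Nat → Int),
      (fun _ _ => 0 : Nat → Nat → Nat)) 1 := by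
    intro x y hxy hyl hyx
    have hxy' : x = y := by omega
    subst hxy'
    refine ⟨by simp [specC_diag], by omega⟩
  have := BOuter_fold tab (tab.length - 1) 2 _ (by omega) (by omega) hT0
  have h2 : 2 + (tab.length - 1) - 1 = tab.length := by omega
  rw [h2] at this
  have hres := this a b hab hbl (by omega)
  unfold BTables
  exact hres

def wsum (st : List (Nat × Nat)) : Nat := (st.map (fun p => 2 * (p.2 - p.1) + 1)).sum

theorem wsum_cons (p : Nat × Nat) (st : List (Nat × Nat)) :
    wsum (p :: st) = 2 * (p.2 - p.1) + 1 + wsum st := by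
  simp [wsum]

theorem BLoop_main (tab : List Int) (cost : Nat → Nat → Int) (par : Nat → Nat → Nat)
    (hc : ∀ a b, a ≤ b → b < tab.length →
        cost a b = specC tab a b ∧ (a < b → par a b = specP tab a b)) :
    ∀ (fuel : Nat) (st : List (Nat × Nat)) (best : Option Int),
      (∀ p ∈ st, p.1 ≤ p.2 ∧ p.2 < tab.length) → wsum st ≤ fuel →
      BLoop cost par fuel st best =
        st.foldl (fun b p => omax b (tmax tab p.1 p.2)) best := by
  intro fuel
  induction fuel with
  | zero =>
    intro st best hst hw
    cases st with
    | nil => rfl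
    | cons p st => rw [wsum_cons] at hw; omega
  | succ fuel ih =>
    intro st best hst hw
    cases st with
    | nil => rfl
    | cons p st =>
      obtain ⟨i, j⟩ := p
      obtain ⟨hij, hjl⟩ := hst (i, j) List.mem_cons_self
      rw [wsum_cons] at hw
      simp only at hij hjl
      by_cases hlt : i < j
      · obtain ⟨hcij, hpij⟩ := hc i j hij hjl
        have hpar : par i j = specP tab i j := hpij hlt
        have hb := specP_bounds tab i j hlt
        rw [BLoop.eq_def]
        simp only [hlt, if_true, hpar]
        have hbest : (match best with
            | none => some (cost i j)
            | some b => if cost i j > b then some (cost i j) else some b) =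
            omax best (some (specC tab i j)) := by
          rcases best with _ | b
          · simp [omax, hcij]
          · simp only [omax, hcij]
            rw [show max b (specC tab i j) =
              (if specC tab i j > b then specC tab i j else b) by
                rw [max_def]; split_ifs <;> omega]
            split_ifs <;> simp
        rw [hbest]
        rw [ih ((specP tab i j + 1, j) :: (i, specP tab i j) :: st)
          (omax best (some (specC tab i j)))
          (by
            intro q hq
            rcases List.mem_cons.mp hq with rfl | hq'
            · exact ⟨by omega, hjl⟩
            rcases List.mem_cons.mp hq' with rfl | hq''
            · exact ⟨by omega, by omega⟩
            · exact hst q (List.mem_cons_of_mem _ hq''))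
          (by rw [wsum_cons, wsum_cons]; omega)]
        rw [List.foldl_cons, List.foldl_cons, List.foldl_cons]
        congr 1
        have htm : tmax tab i j = omax (some (specC tab i j))
            (omax (tmax tab i (specP tab i j)) (tmax tab (specP tab i j + 1) j)) := by
          rw [tmax]; exact dif_neg (by omega)
        rw [htm,
          omax_assoc (omax best (some (specC tab i j))) (tmax tab (specP tab i j + 1) j)
            (tmax tab i (specP tab i j)),
          omax_comm (tmax tab (specP tab i j + 1) j) (tmax tab i (specP tab i j)),
          omax_assoc best (some (specC tab i j))
            (omax (tmax tab i (specP tab i j)) (tmax tab (specP tab i j + 1) j))]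
      · have hieqj : i = j := by omega
        rw [BLoop.eq_def]
        simp only [hlt, if_false]
        rw [ih st best
          (fun q hq => hst q (List.mem_cons_of_mem _ hq)) (by omega)]
        rw [List.foldl_cons]
        congr 1
        have htm : tmax tab i j = none := by rw [tmax]; exact dif_pos (by omega)
        rw [htm, omax_none_right]

-- ===== VERDICT (by name: the statement is the Claim_ definition above) =====
theorem opt_sum_spec : Claim_equal_opt_sum := by
  unfold Claim_equal_opt_sum
  intro tab _ hpre
  unfold Spec_opt_sum
  unfold Pre_opt_sum at hpre
  set n := tab.length with hndef
  set st0 : ASt := (fun a b => if a = b ∧ a < n then some (tab.getD a 0) else none,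
    fun _ _ => none) with hst0def
  have hInv0 : InvOn tab st0 0 (n - 1) := by
    intro a b _ hab hbn
    refine ⟨?_, ?_, ?_⟩
    · intro heq
      show (if a = b ∧ a < n then some (tab.getD a 0) else none) = some (tab.getD a 0)
      rw [if_pos ⟨heq, by omega⟩]
    · intro v hv
      replace hv : (if a = b ∧ a < n then some (tab.getD a 0) else none) = some v := hv
      by_cases hc : a = b ∧ a < n
      · rw [if_pos hc] at hv
        obtain ⟨rfl⟩ := hc.1
        rw [specC_diag]
        exact (Option.some_inj.mp hv).symm
      · rw [if_neg hc] at hv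
        cases hv
    · intro hlt hset
      replace hset : (if a = b ∧ a < n then some (tab.getD a 0) else none) ≠ none := hset
      by_cases hc : a = b ∧ a < n
      · omega
      · rw [if_neg hc] at hset
        simp at hset
  obtain ⟨_, _, hC3⟩ := ADP_main tab (n * n + 1) 0 (n - 1) st0
    (by
      have h : n - 1 - 0 + 1 = n := by omega
      rw [h]
      exact Nat.le_succ (n * n)) (by omega) hInv0
  have hdisp : Adisplay (ADP tab (n * n + 1) st0 0 (n - 1)).2 n 0 (n - 1) [] =
      [] ++ nodes tab 0 (n - 1) :=
    Adisplay_eq tab _ (n - 1) (fun a b hab hbN => hC3 a b (by omega) hab hbN)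
      n 0 (n - 1) [] (by omega) (Nat.le_refl _) (by omega)
  have hnodes : nodes tab 0 (n - 1) = specC tab 0 (n - 1) ::
      (nodes tab 0 (specP tab 0 (n - 1)) ++ nodes tab (specP tab 0 (n - 1) + 1) (n - 1)) := by
    rw [nodes]
    exact dif_neg (by omega)
  have hAval : opt_sum tab = (PySem.List.max? (nodes tab 0 (n - 1)) (fun x => x)).getD 0 := by
    show (PySem.List.max? (Adisplay (ADP tab (n * n + 1) st0 0 (n - 1)).2 n 0 (n - 1) [])
      (fun x => x)).getD 0 = _
    rw [hdisp, List.nil_append]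
  have hBL := BLoop_main tab (BTables tab).1 (BTables tab).2 (BTables_spec tab)
      (2 * n) [(0, n - 1)] none
      (by
        intro p hp
        rw [List.mem_singleton] at hp
        subst hp
        exact ⟨by omega, by omega⟩)
      (by rw [wsum_cons]; simp [wsum]; omega)
  have hBval : opt_sum_alt tab = (tmax tab 0 (n - 1)).getD 0 := by
    show (BLoop (BTables tab).1 (BTables tab).2 (2 * n) [(0, n - 1)] none).getD 0 = _
    rw [hBL, List.foldl_cons]
    rfl
  have htm' : tmax tab 0 (n - 1) = some ((nodes tab 0 (specP tab 0 (n - 1)) ++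
      nodes tab (specP tab 0 (n - 1) + 1) (n - 1)).foldl max (specC tab 0 (n - 1))) := by
    rw [tmax_nodes tab n 0 (n - 1) (by omega), hnodes, List.foldl_cons]
    have h0 : omax none (some (specC tab 0 (n - 1))) = some (specC tab 0 (n - 1)) := rfl
    rw [h0, fold_omax_some]
  rw [hAval, hBval, hnodes, PySem.List.max?_id_cons, htm']
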